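-- pv_equiv track=rewrite | github.com/IronAdamant/PythonBol-Translator | src/cobol_safe_translator/utils.py | coalesce_qualified
-- ===== SOURCE A (Python) =====
-- def coalesce_qualified(ops: list[str]) -> list[str]:
--     """Merge OF/IN qualified names into single operands.
--
--     Converts ['WS-NAME', 'OF', 'WS-GROUP-A', 'TO', 'WS-B']
--     into     ['WS-NAME OF WS-GROUP-A', 'TO', 'WS-B'].
--     Supports multi-level: ['F', 'OF', 'G1', 'OF', 'G2'] → ['F OF G1 OF G2'].
--     """
--     if not ops:
--         return ops
--     result: list[str] = []
--     i = 0
--     while i < len(ops):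
--         token = ops[i]
--         # Check if next token is OF/IN — coalesce into qualified name
--         if (i + 2 < len(ops)
--                 and ops[i + 1].upper() in ("OF", "IN")
--                 and token.upper() not in ("TO", "FROM", "BY", "GIVING",
--                     "INTO", "UNTIL", "DEPENDING", "ON", "REPLACING",
--                     "TALLYING", "DELIMITED", "CORRESPONDING", "CORR")):
--             parts = [token, ops[i + 1], ops[i + 2]]
--             i += 3
--             # Continue coalescing chained OF/IN
--             while (i + 1 < len(ops)
--                    and ops[i].upper() in ("OF", "IN")):
--                 parts.append(ops[i])
--                 if i + 1 < len(ops):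
--                     parts.append(ops[i + 1])
--                     i += 2
--                 else:
--                     break
--             result.append(" ".join(parts))
--         else:
--             result.append(token)
--             i += 1
--     return result
-- ===== SOURCE B (Python) =====
-- RESERVED = frozenset({"TO", "FROM", "BY", "GIVING", "INTO", "UNTIL", "DEPENDING",
--                       "ON", "REPLACING", "TALLYING", "DELIMITED",
--                       "CORRESPONDING", "CORR"})
--
--
-- def coalesce_qualified(ops: list[str]) -> list[str]:
--     """Merge OF/IN qualified names into single operands (single flat pass).
--
--     Instead of nested scans from each group head, walk the tokens once and
--     decide at each OF/IN connector whether it folds the following name into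
--     the previously emitted operand.
--     """
--     result: list[str] = []
--     last_eligible = False
--     i = 0
--     n = len(ops)
--     while i < n:
--         token = ops[i]
--         if token.upper() in ("OF", "IN") and result and last_eligible and i + 1 < n:
--             result[-1] = result[-1] + " " + token + " " + ops[i + 1]
--             i += 2
--             # eligibility persists: a merged operand can keep chaining
--         else:
--             result.append(token)
--             last_eligible = token.upper() not in RESERVED
--             i += 1
--     return result
-- ===== Notes on version B (the rewrite author's own statement) =====
-- stated objective: simpler
-- what changed: A scans from each group head with a nested inner while-loop that accumulates a parts list and rejoins it; B makes one flat pass that appends tokens and, at each OF/IN connector, folds the following name into the previously emitted operand, tracking eligibility in a single boolean.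
import Mathlib
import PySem

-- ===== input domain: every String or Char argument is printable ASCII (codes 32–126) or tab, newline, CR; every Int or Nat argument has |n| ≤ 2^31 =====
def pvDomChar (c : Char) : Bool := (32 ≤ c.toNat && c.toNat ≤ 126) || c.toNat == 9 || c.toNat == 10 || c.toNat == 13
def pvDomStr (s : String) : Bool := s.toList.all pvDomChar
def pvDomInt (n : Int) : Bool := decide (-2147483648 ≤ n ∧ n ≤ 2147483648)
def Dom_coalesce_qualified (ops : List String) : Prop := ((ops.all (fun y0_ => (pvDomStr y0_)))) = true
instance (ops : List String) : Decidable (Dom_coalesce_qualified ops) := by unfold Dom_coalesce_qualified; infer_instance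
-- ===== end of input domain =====

-- B replaces A's nested head-anchored rescans by one flat pass that folds each
-- OF/IN connector into the previously emitted operand (objective: simpler).

-- shared helpers (both Pythons test the same token classes)
def pvIsOfIn (t : String) : Bool := (PySem.Str.upper t == "OF") || (PySem.Str.upper t == "IN")

def pvIsReserved (t : String) : Bool :=
  ["TO", "FROM", "BY", "GIVING", "INTO", "UNTIL", "DEPENDING", "ON", "REPLACING",
   "TALLYING", "DELIMITED", "CORRESPONDING", "CORR"].contains (PySem.Str.upper t)

-- ===== PORT A =====
-- A's inner `while` loop: absorb chained "OF name" pairs into `parts`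
def pvChainA (parts : List String) : List String → List String × List String
  | c :: nx :: rest => if pvIsOfIn c then pvChainA (parts ++ [c, nx]) rest else (parts, c :: nx :: rest)
  | rest => (parts, rest)

lemma pvChainA_snd_len (l parts : List String) : (pvChainA parts l).2.length ≤ l.length := by
  induction parts, l using pvChainA.induct with
  | case1 parts c nx rest h ih =>
      simp only [pvChainA, h, if_true] at *
      simp only [List.length_cons]; omega
  | case2 parts c nx rest h => simp [pvChainA, h]
  | case3 parts rest h => 
      cases rest with
      | nil => simp [pvChainA]
      | cons a t => cases t with
        | nil => simp [pvChainA]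
        | cons b u => exact absurd rfl (h a b u)

-- A's outer `while` loop over the token index
def pvGoA : List String → List String
  | [] => []
  | t :: c :: nx :: rest2 =>
      if pvIsOfIn c && !pvIsReserved t then
        PySem.Str.join " " (pvChainA [t, c, nx] rest2).1 :: pvGoA (pvChainA [t, c, nx] rest2).2
      else t :: pvGoA (c :: nx :: rest2)
  | t :: rest => t :: pvGoA rest
termination_by l => l.length
decreasing_by
  · have := pvChainA_snd_len rest2 [t, c, nx]; simp only [List.length_cons]; omega
  · simp
  · simp

def coalesce_qualified (ops : List String) : List String :=
  if ops.isEmpty then ops else pvGoA ops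

-- ===== PORT B =====
-- one flat pass: `acc` is `result` reversed, `elig` is `last_eligible`
def pvGoB (acc : List String) (elig : Bool) : List String → List String
  | [] => acc.reverse
  | t :: nx :: rest2 =>
      match acc with
      | last :: accTl =>
        if pvIsOfIn t && elig then
          pvGoB ((last ++ " " ++ t ++ " " ++ nx) :: accTl) true rest2
        else
          pvGoB (t :: last :: accTl) (!pvIsReserved t) (nx :: rest2)
      | [] => pvGoB (t :: acc) (!pvIsReserved t) (nx :: rest2)
  | t :: rest => pvGoB (t :: acc) (!pvIsReserved t) rest
termination_by l => l.length
decreasing_by all_goals (simp only [List.length_cons]; omega)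

def coalesce_qualified_alt (ops : List String) : List String :=
  pvGoB [] false ops

-- ===== PRECONDITION & SPEC =====
def Spec_coalesce_qualified (ops : List String) (out : List String) : Prop := out = coalesce_qualified_alt ops
instance (ops : List String) (out : List String) : Decidable (Spec_coalesce_qualified ops out) := by unfold Spec_coalesce_qualified; infer_instance

-- ===== CLAIM (what is proved, stated in full; the proofs are below) =====
def Claim_equal_coalesce_qualified : Prop := ∀ (ops : List String), Dom_coalesce_qualified ops → Spec_coalesce_qualified ops (coalesce_qualified ops)

-- ===== LEMMAS AND PROOFS =====

-- A's chain loop with the joined string as state (proof-side view of pvChainA)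
def pvChainS (s : String) : List String → String × List String
  | c :: nx :: rest => if pvIsOfIn c then pvChainS (s ++ " " ++ c ++ " " ++ nx) rest else (s, c :: nx :: rest)
  | rest => (s, rest)

lemma pvCharsJoin_snoc (sep y : List Char) :
    ∀ (xs : List (List Char)), xs ≠ [] →
      PySem.Chars.join sep (xs ++ [y]) = PySem.Chars.join sep xs ++ sep ++ y := by
  intro xs
  induction xs with
  | nil => intro h; exact absurd rfl h
  | cons p t ih =>
      intro _
      cases t with
      | nil => simp [PySem.Chars.join_cons_cons, PySem.Chars.join_singleton]
      | cons q u =>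
          have hih := ih (by simp)
          simp only [List.cons_append, PySem.Chars.join_cons_cons] at hih ⊢
          rw [hih]
          simp [List.append_assoc]

lemma pvJoin_snoc2 (parts : List String) (c nx : String) (h : parts ≠ []) :
    PySem.Str.join " " (parts ++ [c, nx]) = PySem.Str.join " " parts ++ " " ++ c ++ " " ++ nx := by
  apply String.toList_inj.mp
  have h1 : parts.map String.toList ≠ [] := by simp [h]
  have h2 : parts.map String.toList ++ [c.toList] ≠ [] := by simp
  simp only [PySem.Str.toList_join, String.toList_append, List.map_append, List.map_cons,
    List.map_nil]
  have e1 := pvCharsJoin_snoc " ".toList c.toList (parts.map String.toList) h1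
  have e2 := pvCharsJoin_snoc " ".toList nx.toList (parts.map String.toList ++ [c.toList]) h2
  calc PySem.Chars.join " ".toList (parts.map String.toList ++ [c.toList, nx.toList])
      = PySem.Chars.join " ".toList ((parts.map String.toList ++ [c.toList]) ++ [nx.toList]) := by
        simp [List.append_assoc]
    _ = PySem.Chars.join " ".toList (parts.map String.toList) ++ " ".toList ++ c.toList
          ++ " ".toList ++ nx.toList := by rw [e2, e1]

lemma pvChain_bridge : ∀ (l parts : List String), parts ≠ [] →
    PySem.Str.join " " (pvChainA parts l).1 = (pvChainS (PySem.Str.join " " parts) l).1 ∧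
    (pvChainA parts l).2 = (pvChainS (PySem.Str.join " " parts) l).2 := by
  intro l parts
  induction parts, l using pvChainA.induct with
  | case1 parts c nx rest h ih =>
      intro hne
      have hne2 : parts ++ [c, nx] ≠ [] := by simp
      have hih := ih hne2
      simp only [pvChainA, pvChainS, h, if_true]
      rw [pvJoin_snoc2 parts c nx hne] at hih
      exact hih
  | case2 parts c nx rest h =>
      intro _
      simp [pvChainA, pvChainS, h]
  | case3 parts rest h =>
      intro _
      cases rest with
      | nil => simp [pvChainA, pvChainS]
      | cons a t =>
          cases t with
          | nil => simp [pvChainA, pvChainS]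
          | cons b u => exact absurd rfl (h a b u)

lemma pvJoin3 (t c nx : String) :
    PySem.Str.join " " [t, c, nx] = t ++ " " ++ c ++ " " ++ nx := by
  apply String.toList_inj.mp
  simp [PySem.Str.toList_join, PySem.Chars.join_cons_cons, PySem.Chars.join_singleton,
    String.toList_append, List.append_assoc]

lemma pvMain : ∀ (k : Nat) (l : List String), l.length ≤ k →
    (∀ t acc, pvGoB (t :: acc) (!pvIsReserved t) l = acc.reverse ++ pvGoA (t :: l)) ∧
    (∀ s accTl, pvGoB (s :: accTl) true l = accTl.reverse ++ (pvChainS s l).1 :: pvGoA (pvChainS s l).2) := by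
  intro k
  induction k with
  | zero =>
      intro l hl
      have hnil : l = [] := List.eq_nil_of_length_eq_zero (Nat.le_zero.mp hl)
      subst hnil
      refine ⟨fun t acc => ?_, fun s accTl => ?_⟩ <;> simp [pvGoB, pvGoA, pvChainS]
  | succ k ih =>
      intro l hl
      cases l with
      | nil =>
          refine ⟨fun t acc => ?_, fun s accTl => ?_⟩ <;> simp [pvGoB, pvGoA, pvChainS]
      | cons c restl =>
          cases restl with
          | nil =>
              refine ⟨fun t acc => ?_, fun s accTl => ?_⟩ <;>
                simp [pvGoB, pvGoA, pvChainS]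
          | cons m restl2 =>
              have hlen1 : (m :: restl2).length ≤ k := by
                simp only [List.length_cons] at hl ⊢; omega
              have hlen2 : restl2.length ≤ k := by
                simp only [List.length_cons] at hl; omega
              refine ⟨fun t acc => ?_, fun s accTl => ?_⟩
              · by_cases hof : pvIsOfIn c = true
                · by_cases hres : pvIsReserved t = true
                  · -- reserved head: B appends c, A passes t through
                    have hD := (ih (m :: restl2) hlen1).1 c (t :: acc)
                    simp only [pvGoB, pvGoA, hof, hres, Bool.not_true, Bool.and_false,
                      if_neg Bool.false_ne_true]
                    rw [hD]
                    simp
                  · -- merge fires in B; A starts a chain at head t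
                    have hC := (ih restl2 hlen2).2 (t ++ " " ++ c ++ " " ++ m) acc
                    have hbr := pvChain_bridge restl2 [t, c, m] (by simp)
                    simp only [pvGoB, pvGoA, hof, hres, Bool.not_false, Bool.and_self, if_true]
                    rw [hC, hbr.1, hbr.2, pvJoin3]
                · -- connector is not OF/IN: both append / pass through
                  have hD := (ih (m :: restl2) hlen1).1 c (t :: acc)
                  simp only [pvGoB, pvGoA, hof, Bool.false_and,
                    if_neg Bool.false_ne_true]
                  rw [hD]
                  simp
              · by_cases hof : pvIsOfIn c = true
                · -- chain continues
                  have hC := (ih restl2 hlen2).2 (s ++ " " ++ c ++ " " ++ m) accTl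
                  simp only [pvGoB, pvChainS, hof, Bool.and_self, if_true]
                  rw [hC]
                · -- chain stops; B appends c with fresh eligibility
                  have hD := (ih (m :: restl2) hlen1).1 c (s :: accTl)
                  simp only [pvGoB, pvChainS, hof, Bool.false_and,
                    if_neg Bool.false_ne_true]
                  rw [hD]
                  simp

-- ===== VERDICT (by name: the statement is the Claim_ definition above) =====
theorem coalesce_qualified_spec : Claim_equal_coalesce_qualified := by
  intro ops _
  unfold Spec_coalesce_qualified coalesce_qualified coalesce_qualified_alt
  cases ops with
  | nil => simp [pvGoB]
  | cons t rest =>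
      simp only [List.isEmpty_cons, if_neg Bool.false_ne_true]
      have h := (pvMain rest.length rest le_rfl).1 t []
      simp only [List.reverse_nil, List.nil_append] at h
      cases rest with
      | nil => simp only [pvGoB] at h ⊢; exact h.symm
      | cons nx rest2 => simp only [pvGoB] at h ⊢; exact h.symm
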